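-- pv_equiv track=rewrite | github.com/rakesh-050791/DS-Algo | Advance/Hashing/02-November-2022.py | solve
-- ===== SOURCE A (Python) =====
-- def solve(A):
--     n = len(A)
--     hashSet = set()
--
--     for i in range(n):
--         x = A[i][0]
--         y = A[i][1]
--
--         element = (str(x), str(y))
--         hashSet.add(element)
--     return len(hashSet)
-- ===== SOURCE B (Python) =====
-- def solve(A):
--     P = sorted([(str(p[0]), str(p[1])) for p in A])
--     if not P:
--         return 0
--     prev = P[0]
--     cnt = 1
--     for cur in P[1:]:
--         if cur != prev:
--             cnt += 1
--             prev = cur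
--     return cnt
-- ===== Notes on version B (the rewrite author's own statement) =====
-- stated objective: alternative
-- what changed: Replaces A's hash-set membership build with a sort of the (str(x), str(y)) pair list followed by a single adjacent-differs scan that counts the distinct pairs.
import Mathlib
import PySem

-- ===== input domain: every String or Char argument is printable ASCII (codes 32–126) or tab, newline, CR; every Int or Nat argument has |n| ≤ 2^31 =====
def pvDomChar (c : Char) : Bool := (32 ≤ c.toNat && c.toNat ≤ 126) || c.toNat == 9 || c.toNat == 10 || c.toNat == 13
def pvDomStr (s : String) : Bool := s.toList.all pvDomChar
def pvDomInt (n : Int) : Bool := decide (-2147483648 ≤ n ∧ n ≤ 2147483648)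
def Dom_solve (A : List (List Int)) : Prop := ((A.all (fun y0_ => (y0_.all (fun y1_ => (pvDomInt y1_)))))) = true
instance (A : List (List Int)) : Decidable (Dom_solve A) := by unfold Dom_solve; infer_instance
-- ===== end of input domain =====

-- B replaces A's hash-set distinct count by a sort-then-adjacent-scan distinct count (alternative algorithm, same result).


-- ===== PORT A =====
-- for i in range(n): hashSet.add((str(A[i][0]), str(A[i][1]))); return len(hashSet)
def solve (A : List (List Int)) : Int :=
  let n := PySem.List.len A
  let hashSet : PySem.Set (String × String) := PySem.Set.empty
  let hashSet :=
    (PySem.List.pyRange 0 n 1).foldl (fun hs i =>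
      let row := PySem.List.pyGetD A i []
      let x := PySem.List.pyGetD row 0 0
      let y := PySem.List.pyGetD row 1 0
      PySem.Set.add hs (PySem.Int.toStr x, PySem.Int.toStr y)) hashSet
  PySem.Set.len hashSet

-- ===== PORT B =====
-- P = sorted([(str(p[0]), str(p[1])) for p in A]); prev/cnt scan over P[1:]
def solve_alt (A : List (List Int)) : Int :=
  let P := PySem.List.sorted2
      (A.map (fun p => (PySem.Int.toStr (PySem.List.pyGetD p 0 0),
                        PySem.Int.toStr (PySem.List.pyGetD p 1 0))))
      (fun t => t.1) (fun t => t.2)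
  match P with
  | [] => 0
  | prev :: rest =>
    (rest.foldl (fun (st : (String × String) × Int) cur =>
        if cur ≠ st.1 then (cur, st.2 + 1) else st) (prev, 1)).2

-- ===== PRECONDITION & SPEC =====
-- A raises IndexError on any row with fewer than 2 elements (p[0] / p[1]); B raises there too.
def Pre_solve (A : List (List Int)) : Prop := ∀ r ∈ A, 2 ≤ r.length
instance (A : List (List Int)) : Decidable (Pre_solve A) := by unfold Pre_solve; infer_instance
def pvWitness_solve : List (List Int) := [[1, 2], [1, 2], [3, 4]]
def Spec_solve (A : List (List Int)) (out : Int) : Prop := out = solve_alt A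
instance (A : List (List Int)) (out : Int) : Decidable (Spec_solve A out) := by unfold Spec_solve; infer_instance

-- ===== CLAIM (what is proved, stated in full; the proofs are below) =====
def Claim_equal_solve : Prop := ∀ (A : List (List Int)), Dom_solve A → Pre_solve A → Spec_solve A (solve A)

-- ===== LEMMAS AND PROOFS =====

-- Python's tuple comparison (sorted2's 'before') is exactly the strict lexicographic order on Lex (String × String).
lemma before_eq_lex :
    (fun (a b : String × String) =>
        decide (a.1 < b.1) || (!decide (b.1 < a.1) && decide (a.2 < b.2)))
      = fun a b => decide (toLex a < toLex b) := by
  funext a b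
  rcases lt_trichotomy a.1 b.1 with h | h | h
  · simp [h, Prod.Lex.lt_iff, not_lt_of_gt h]
  · simp [h, Prod.Lex.lt_iff]
  · simp [h, Prod.Lex.lt_iff, not_lt_of_gt h, ne_of_gt h]

lemma sorted2_eq_sorted_lex (P : List (String × String)) :
    PySem.List.sorted2 P (fun t => t.1) (fun t => t.2)
      = PySem.List.sorted P (fun t => toLex t) := by
  rw [PySem.List.sorted_eq_foldl_insertBy]
  show List.foldl
      (fun acc x => PySem.List.insertBy
        (fun (a b : String × String) =>
          decide (a.1 < b.1) || (!decide (b.1 < a.1) && decide (a.2 < b.2))) x acc) [] P = _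
  rw [before_eq_lex]

-- the adjacent-differs scan on a key-sorted list counts the distinct elements
lemma scan_count {α κ : Type} [DecidableEq α] [LinearOrder κ] (key : α → κ)
    (hinj : Function.Injective key) :
    ∀ (ys : List α) (prev : α) (c : Int),
      List.Pairwise (fun a b => key a ≤ key b) (prev :: ys) →
      (ys.foldl (fun (st : α × Int) cur =>
          if cur ≠ st.1 then (cur, st.2 + 1) else st) (prev, c)).2
        = c + ((prev :: ys).toFinset.card : Int) - 1 := by
  intro ys
  induction ys with
  | nil => intro prev c _; simp
  | cons cur rest ih =>
    intro prev c hp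
    by_cases hcp : cur = prev
    · subst hcp
      have hp' : List.Pairwise (fun a b => key a ≤ key b) (cur :: rest) :=
        hp.sublist (by simp)
      simpa using ih cur c hp'
    · have hp' : List.Pairwise (fun a b => key a ≤ key b) (cur :: rest) :=
        hp.sublist (by simp)
      have hprev_notin : prev ∉ cur :: rest := by
        intro hmem
        rcases List.mem_cons.mp hmem with h | h
        · exact hcp h.symm
        · have h1 : key prev ≤ key cur := (List.pairwise_cons.mp hp).1 cur (by simp)
          have h2 : key cur ≤ key prev := (List.pairwise_cons.mp hp').1 prev h
          exact hcp (hinj (le_antisymm h1 h2)).symm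
      have hcard : (prev :: cur :: rest).toFinset.card
          = (cur :: rest).toFinset.card + 1 := by
        simp only [List.toFinset_cons]
        rw [Finset.card_insert_of_notMem (by simpa using hprev_notin)]
      simp only [List.foldl_cons, if_pos (by exact hcp : cur ≠ prev), ne_eq]
      rw [ih cur (c + 1) hp', hcard]
      push_cast; ring

-- A's set-build equals the deduped pair list
lemma solve_eq_card (A : List (List Int)) :
    solve A = ((A.map (fun p => (PySem.Int.toStr (PySem.List.pyGetD p 0 0),
                                 PySem.Int.toStr (PySem.List.pyGetD p 1 0)))).toFinset.card : Int) := by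
  unfold solve
  simp only [PySem.List.len]
  rw [show (PySem.List.pyRange 0 (A.length : Int) 1) = PySem.List.pyRange 0 (PySem.List.len A) 1
        from by simp [PySem.List.len]]
  rw [PySem.List.foldl_pyRange_zero_pyGetD A []
        (fun hs row => PySem.Set.add hs (PySem.Int.toStr (PySem.List.pyGetD row 0 0),
                                         PySem.Int.toStr (PySem.List.pyGetD row 1 0)))
        PySem.Set.empty]
  set P := A.map (fun p => (PySem.Int.toStr (PySem.List.pyGetD p 0 0),
                            PySem.Int.toStr (PySem.List.pyGetD p 1 0))) with hPdef
  have hfold : List.foldl (fun hs row =>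
      PySem.Set.add hs (PySem.Int.toStr (PySem.List.pyGetD row 0 0),
                        PySem.Int.toStr (PySem.List.pyGetD row 1 0))) PySem.Set.empty A
      = PySem.Set.ofList P := by
    rw [PySem.Set.ofList_eq_foldl, hPdef, List.foldl_map]
    rfl
  rw [hfold]
  have hnd := PySem.Set.nodup_ofList P
  have hfs : (PySem.Set.ofList P).toFinset = P.toFinset := by
    apply Finset.ext; intro x
    simp [List.mem_toFinset, PySem.Set.mem_ofList]
  have hcard := List.toFinset_card_of_nodup hnd
  rw [hfs] at hcard
  simp [PySem.Set.len, ← hcard]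

-- ===== VERDICT (by name: the statement is the Claim_ definition above) =====
theorem solve_spec : Claim_equal_solve := by
  intro A _ _
  show solve A = solve_alt A
  rw [solve_eq_card]
  unfold solve_alt
  set P := A.map (fun p => (PySem.Int.toStr (PySem.List.pyGetD p 0 0),
                            PySem.Int.toStr (PySem.List.pyGetD p 1 0))) with hP
  simp only [sorted2_eq_sorted_lex]
  have hperm := PySem.List.sorted_perm P (fun t => toLex t) false
  have hpw := PySem.List.sorted_pairwise P (fun t => toLex t)
  cases hS : PySem.List.sorted P (fun t => toLex t) with
  | nil =>
    have : P = [] := by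
      have := hperm; rw [hS] at this
      exact (List.Perm.nil_eq this).symm
    simp [this]
  | cons prev rest =>
    rw [hS] at hperm hpw
    have hcnt := scan_count (fun t : String × String => toLex t) toLex.injective
      rest prev 1 hpw
    have hfs : (prev :: rest).toFinset = P.toFinset := List.toFinset_eq_of_perm _ _ hperm
    simp only [hcnt, hfs]
    ring
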